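-- pv_equiv track=rewrite | github.com/abedhossainn/PlantIQ | apps/pipeline/src/ingestion/docling_converter.py | _coalesce_consecutive_headings
-- ===== SOURCE A (Python) =====
-- def _is_h2_heading(line_text: str) -> bool:
--     """Return True for level-2 markdown headings, excluding deeper levels."""
--     return line_text.startswith('##') and not line_text.startswith('###')
--
-- def _flush_h2_heading_buffer(buffer: list[str], output: list[str]) -> None:
--     """Flush buffered consecutive H2 headings into output with coalescing."""
--     if not buffer:
--         return
--     if len(buffer) == 1:
--         output.append(buffer[0])
--         return
--     combined = buffer[0] + ' / ' + ' / '.join(h.lstrip('#').strip() for h in buffer[1:])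
--     output.append(combined)
--
-- def _next_non_empty_line_is_h2(all_lines: list[str], current_index: int) -> bool:
--     """Look ahead up to 3 lines and check whether the next non-empty line is an H2."""
--     for j in range(current_index + 1, min(current_index + 4, len(all_lines))):
--         next_stripped = all_lines[j].strip()
--         if not next_stripped:
--             continue
--         return _is_h2_heading(next_stripped)
--     return False
--
-- def _coalesce_consecutive_headings(md_content: str) -> str:
--     """
--     Coalesce multiple consecutive headings without intervening text.
--     If multiple ## headings appear within 3 lines of each other with no prose,
--     combine them into a single heading or reflow as a paragraph.
--     """
--     lines = md_content.split('\n')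
--     result: list[str] = []
--     heading_buffer: list[str] = []
--
--     for i, line in enumerate(lines):
--         stripped = line.strip()
--
--         if _is_h2_heading(stripped):
--             heading_buffer.append(stripped)
--             continue
--
--         if stripped:
--             _flush_h2_heading_buffer(heading_buffer, result)
--             heading_buffer = []
--             result.append(line)
--             continue
--
--         if heading_buffer and not _next_non_empty_line_is_h2(lines, i):
--             _flush_h2_heading_buffer(heading_buffer, result)
--             heading_buffer = []
--         result.append(line)
--
--     _flush_h2_heading_buffer(heading_buffer, result)
--     return '\n'.join(result)
-- ===== SOURCE B (Python) =====
-- def _next_non_empty_line_is_h2(all_lines, current_index):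
--     """Look ahead up to 3 lines and check whether the next non-empty line is an H2."""
--     for j in range(current_index + 1, min(current_index + 4, len(all_lines))):
--         next_stripped = all_lines[j].strip()
--         if not next_stripped:
--             continue
--         return next_stripped.startswith('##') and not next_stripped.startswith('###')
--     return False
--
-- def _coalesce_consecutive_headings(md_content: str) -> str:
--     """Index-driven rewrite: consume each H2 run with an inner loop, no persistent buffer."""
--     lines = md_content.split('\n')
--     n = len(lines)
--     result = []
--     i = 0
--     while i < n:
--         stripped = lines[i].strip()
--         if stripped.startswith('##') and not stripped.startswith('###'):
--             headings = [stripped]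
--             i += 1
--             # consume the run: further H2s, and blank lines still followed by an H2
--             while i < n:
--                 t = lines[i].strip()
--                 if t.startswith('##') and not t.startswith('###'):
--                     headings.append(t)
--                     i += 1
--                 elif not t and _next_non_empty_line_is_h2(lines, i):
--                     result.append(lines[i])
--                     i += 1
--                 else:
--                     break
--             if len(headings) == 1:
--                 result.append(headings[0])
--             else:
--                 result.append(headings[0] + ' / ' +
--                               ' / '.join(h.lstrip('#').strip() for h in headings[1:]))
--             if i < n:  # the line that ended the run (blank or prose), verbatim
--                 result.append(lines[i])
--                 i += 1
--         else:
--             result.append(lines[i])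
--             i += 1
--     return '\n'.join(result)
-- ===== Notes on version B (the rewrite author's own statement) =====
-- stated objective: alternative
-- what changed: Replaces A's flat for-loop with a persistent heading buffer and a flush helper by an index-driven outer while loop that, on meeting an H2, consumes the whole run (headings and continuation blanks) in an inner loop and emits the coalesced heading once.
import Mathlib
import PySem

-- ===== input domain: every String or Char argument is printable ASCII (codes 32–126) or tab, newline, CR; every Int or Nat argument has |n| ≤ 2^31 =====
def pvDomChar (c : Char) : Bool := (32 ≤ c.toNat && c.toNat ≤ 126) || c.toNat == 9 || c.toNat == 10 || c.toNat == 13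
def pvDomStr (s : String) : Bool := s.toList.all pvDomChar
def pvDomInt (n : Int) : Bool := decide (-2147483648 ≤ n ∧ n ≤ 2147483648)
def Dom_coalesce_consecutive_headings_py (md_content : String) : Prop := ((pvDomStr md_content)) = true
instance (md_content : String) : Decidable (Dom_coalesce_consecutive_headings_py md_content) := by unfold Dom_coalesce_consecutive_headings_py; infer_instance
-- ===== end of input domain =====

-- B replaces A's flat loop with a persistent heading buffer and a flush helper by an
-- index-driven outer loop that consumes each H2 run in an inner loop and emits the
-- coalesced heading once (objective: alternative decomposition, same cost).

-- shared helpers (identical helper code in both Pythons)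
-- _is_h2_heading
def pvIsH2 (s : String) : Bool :=
  PySem.Str.startswith s "##" && !(PySem.Str.startswith s "###")

-- h.lstrip('#') — exact hand port: drop the leading '#' characters
def pvLstripHash (s : String) : String :=
  String.ofList (s.toList.dropWhile (· == '#'))

-- _next_non_empty_line_is_h2(all_lines, i): range(i+1, min(i+4, len)) visits at most
-- the first 3 lines AFTER position i, i.e. the first 3 entries of the suffix; exact.
def pvLookGo (rest : List String) (k : Nat) : Bool :=
  match rest, k with
  | _, 0 => false
  | [], _ => false
  | l :: t, Nat.succ k' =>
    if PySem.Str.strip l = "" then pvLookGo t k'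
    else pvIsH2 (PySem.Str.strip l)

def pvLook3 (rest : List String) : Bool := pvLookGo rest 3

-- s.split('\n'): PySem.Str.split? is some for the nonempty separator "\n"
def pvSplitNl (s : String) : List String := (PySem.Str.split? s "\n").getD []

-- ===== PORT A =====
-- _flush_h2_heading_buffer
def pvFlushA (buffer output : List String) : List String :=
  match buffer with
  | [] => output
  | [h] => output ++ [h]
  | h :: rest =>
      output ++ [h ++ " / " ++
        PySem.Str.join " / " (rest.map (fun x => PySem.Str.strip (pvLstripHash x)))]

-- the for-loop of A over the remaining lines; state (result, heading_buffer)
def pvLoopA (lines res buf : List String) : List String :=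
  match lines with
  | [] => pvFlushA buf res
  | line :: rest =>
    if pvIsH2 (PySem.Str.strip line) = true then
      pvLoopA rest res (buf ++ [PySem.Str.strip line])
    else if PySem.Str.strip line ≠ "" then
      pvLoopA rest (pvFlushA buf res ++ [line]) []
    else if (!buf.isEmpty && !pvLook3 rest) = true then
      pvLoopA rest (pvFlushA buf res ++ [line]) []
    else pvLoopA rest (res ++ [line]) buf

def coalesce_consecutive_headings_py (md_content : String) : String :=
  PySem.Str.join "\n" (pvLoopA (pvSplitNl md_content) [] [])

-- ===== PORT B =====
-- emit the collected run: single heading unchanged, else first + ' / ' + joined rest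
def pvEmitB (hs : List String) : String :=
  match hs with
  | [] => ""      -- unreachable: the inner loop always starts with one heading
  | [h] => h
  | h :: rest =>
      h ++ " / " ++
        PySem.Str.join " / " (rest.map (fun x => PySem.Str.strip (pvLstripHash x)))

mutual
-- inner run-consumption loop: extend the run / keep continuation blanks; on the line
-- that ends the run, emit the coalesced heading, append that line, resume the outer loop
def pvRunB (lines res hs : List String) : List String :=
  match lines with
  | [] => res ++ [pvEmitB hs]
  | l :: rest =>
    if pvIsH2 (PySem.Str.strip l) = true then
      pvRunB rest res (hs ++ [PySem.Str.strip l])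
    else if ((PySem.Str.strip l == "") && pvLook3 rest) = true then
      pvRunB rest (res ++ [l]) hs
    else pvLoopB rest (res ++ [pvEmitB hs] ++ [l])

-- the outer loop of B
def pvLoopB (lines res : List String) : List String :=
  match lines with
  | [] => res
  | l :: rest =>
    if pvIsH2 (PySem.Str.strip l) = true then pvRunB rest res [PySem.Str.strip l]
    else pvLoopB rest (res ++ [l])
end

def coalesce_consecutive_headings_py_alt (md_content : String) : String :=
  PySem.Str.join "\n" (pvLoopB (pvSplitNl md_content) [])

-- ===== PRECONDITION & SPEC =====
def Spec_coalesce_consecutive_headings_py (md_content : String) (out : String) : Prop := out = coalesce_consecutive_headings_py_alt md_content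
instance (md_content : String) (out : String) : Decidable (Spec_coalesce_consecutive_headings_py md_content out) := by unfold Spec_coalesce_consecutive_headings_py; infer_instance

-- ===== CLAIM (what is proved, stated in full; the proofs are below) =====
def Claim_equal_coalesce_consecutive_headings_py : Prop := ∀ (md_content : String), Dom_coalesce_consecutive_headings_py md_content → Spec_coalesce_consecutive_headings_py md_content (coalesce_consecutive_headings_py md_content)

-- ===== LEMMAS AND PROOFS =====

theorem pvFlush_emit (buf res : List String) (h : buf ≠ []) :
    pvFlushA buf res = res ++ [pvEmitB buf] := by
  match buf with
  | [] => exact absurd rfl h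
  | [x] => rfl
  | x :: y :: t => rfl

-- simultaneous invariant: A's loop with empty buffer is B's outer loop, and A's loop
-- with a nonempty buffer is B's inner run-consumption loop
theorem pvLoop_eq (lines : List String) :
    (∀ res, pvLoopA lines res [] = pvLoopB lines res) ∧
    (∀ res hs, hs ≠ [] → pvLoopA lines res hs = pvRunB lines res hs) := by
  induction lines with
  | nil =>
    refine ⟨fun res => rfl, fun res hs hne => ?_⟩
    rw [pvLoopA, pvRunB]
    exact pvFlush_emit hs res hne
  | cons l rest ih =>
    constructor
    · intro res
      rw [pvLoopA, pvLoopB]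
      by_cases h1 : pvIsH2 (PySem.Str.strip l) = true
      · rw [if_pos h1, if_pos h1]
        simp only [List.nil_append]
        exact ih.2 res [PySem.Str.strip l] (by simp)
      · rw [if_neg h1, if_neg h1]
        by_cases h2 : PySem.Str.strip l = ""
        · rw [h2, if_neg (by simp), if_neg (by simp)]
          exact ih.1 (res ++ [l])
        · rw [if_pos h2]
          have hfl : pvFlushA [] res = res := rfl
          rw [hfl]
          exact ih.1 (res ++ [l])
    · intro res hs hne
      rw [pvLoopA, pvRunB]
      by_cases h1 : pvIsH2 (PySem.Str.strip l) = true
      · rw [if_pos h1, if_pos h1]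
        exact ih.2 res (hs ++ [PySem.Str.strip l]) (by simp)
      · rw [if_neg h1, if_neg h1]
        by_cases h2 : PySem.Str.strip l = ""
        · rw [h2, if_neg (by simp)]
          by_cases h3 : pvLook3 rest = true
          · rw [h3, if_neg (by simp), if_pos (by simp)]
            exact ih.2 (res ++ [l]) hs hne
          · rw [Bool.not_eq_true] at h3
            rw [h3, if_pos (by simp [hne]), if_neg (by simp)]
            rw [pvFlush_emit hs res hne]
            exact ih.1 (res ++ [pvEmitB hs] ++ [l])
        · rw [if_pos h2,
            if_neg (by rw [Bool.and_eq_true, beq_iff_eq]; exact fun hc => h2 hc.1)]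
          rw [pvFlush_emit hs res hne]
          exact ih.1 (res ++ [pvEmitB hs] ++ [l])

-- ===== VERDICT (by name: the statement is the Claim_ definition above) =====
theorem coalesce_consecutive_headings_py_spec : Claim_equal_coalesce_consecutive_headings_py := by
  intro md _
  unfold Spec_coalesce_consecutive_headings_py coalesce_consecutive_headings_py
    coalesce_consecutive_headings_py_alt
  rw [(pvLoop_eq (pvSplitNl md)).1 []]
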